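-- pv_equiv track=rewrite | github.com/MisterMandarino/3D-Packing-Problem-using-Evolutionary-Computations | plot.py | rotate_items_3d
-- ===== SOURCE A (Python) =====
-- def rotate_items_3d(genome, items):
--     new_items = []
--     for item, gene in zip(items, genome):
--         w,h,d = item[0], item[1], item[2]
--
--         if gene[3] == 1:
--             temp = h
--             h = d
--             d = temp
--         if gene[4] == 1:
--             temp = w
--             w = d
--             d = temp
--         if gene[5] == 1:
--             temp = w
--             w = h
--             h = temp
--
--         new_items.append((w,h,d))
--     return new_items
-- ===== SOURCE B (Python) =====
-- # Table-driven: the three sequential swaps amount to one permutation of (w,h,d)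
-- # per (gene[3],gene[4],gene[5]) bit pattern; precomputed once, applied per item.
-- _ROT = {
--     (False, False, False): (0, 1, 2),
--     (False, False, True):  (1, 0, 2),
--     (False, True,  False): (2, 1, 0),
--     (False, True,  True):  (1, 2, 0),
--     (True,  False, False): (0, 2, 1),
--     (True,  False, True):  (2, 0, 1),
--     (True,  True,  False): (1, 2, 0),
--     (True,  True,  True):  (2, 1, 0),
-- }
--
-- def rotate_items_3d(genome, items):
--     out = []
--     for item, gene in zip(items, genome):
--         dims = (item[0], item[1], item[2])
--         i, j, k = _ROT[(gene[3] == 1, gene[4] == 1, gene[5] == 1)]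
--         out.append((dims[i], dims[j], dims[k]))
--     return out
-- ===== Notes on version B (the rewrite author's own statement) =====
-- stated objective: alternative
-- what changed: Replaces the three order-dependent conditional swaps per item with a single precomputed 8-entry permutation table keyed by the gene's rotation bits, applied as one reindex of the dimension triple.
import Mathlib
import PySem

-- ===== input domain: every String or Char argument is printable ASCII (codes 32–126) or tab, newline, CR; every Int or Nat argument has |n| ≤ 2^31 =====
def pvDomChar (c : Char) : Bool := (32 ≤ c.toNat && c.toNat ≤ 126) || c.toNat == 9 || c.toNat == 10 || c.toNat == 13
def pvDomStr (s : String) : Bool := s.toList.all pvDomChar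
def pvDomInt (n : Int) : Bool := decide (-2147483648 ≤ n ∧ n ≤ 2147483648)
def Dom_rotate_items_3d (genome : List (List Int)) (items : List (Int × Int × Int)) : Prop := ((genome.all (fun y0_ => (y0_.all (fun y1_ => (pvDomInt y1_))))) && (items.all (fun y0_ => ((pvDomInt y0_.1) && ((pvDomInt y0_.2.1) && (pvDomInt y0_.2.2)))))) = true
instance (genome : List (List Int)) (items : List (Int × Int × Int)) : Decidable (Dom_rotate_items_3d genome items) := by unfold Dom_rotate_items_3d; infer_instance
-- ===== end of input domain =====

-- B replaces A's three sequential conditional swaps with one precomputed 8-entry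
-- permutation table keyed by the three rotation bits (objective: alternative).

-- ===== PORT A =====
-- loop body of A: three conditional swaps with a temp, then append
def rotStepA (new_items : List (Int × Int × Int)) (p : (Int × Int × Int) × List Int) : List (Int × Int × Int) :=
  let item := p.1
  let gene : List Int := p.2
  let w := item.1
  let h := item.2.1
  let d := item.2.2
  let (h, d) := if (PySem.List.pyGet? gene 3).getD 0 = 1 then (d, h) else (h, d)
  let (w, d) := if (PySem.List.pyGet? gene 4).getD 0 = 1 then (d, w) else (w, d)
  let (w, h) := if (PySem.List.pyGet? gene 5).getD 0 = 1 then (h, w) else (w, h)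
  new_items ++ [(w, h, d)]

def rotate_items_3d (genome : List (List Int)) (items : List (Int × Int × Int)) : List (Int × Int × Int) :=
  (items.zip genome).foldl rotStepA []

-- ===== PORT B =====
-- the 8-entry permutation table _ROT from Source B
def rotTable (b3 b4 b5 : Bool) : Nat × Nat × Nat :=
  match b3, b4, b5 with
  | false, false, false => (0, 1, 2)
  | false, false, true  => (1, 0, 2)
  | false, true,  false => (2, 1, 0)
  | false, true,  true  => (1, 2, 0)
  | true,  false, false => (0, 2, 1)
  | true,  false, true  => (2, 0, 1)
  | true,  true,  false => (1, 2, 0)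
  | true,  true,  true  => (2, 1, 0)

-- dims[i] for a 3-tuple
def dimAt (t : Int × Int × Int) (i : Nat) : Int :=
  match i with
  | 0 => t.1
  | 1 => t.2.1
  | _ => t.2.2

-- loop body of B: one table lookup, one reindex, then append
def rotStepB (out : List (Int × Int × Int)) (p : (Int × Int × Int) × List Int) : List (Int × Int × Int) :=
  let dims := (p.1.1, p.1.2.1, p.1.2.2)
  let gene : List Int := p.2
  let perm := rotTable ((PySem.List.pyGet? gene 3).getD 0 == 1)
                       ((PySem.List.pyGet? gene 4).getD 0 == 1)
                       ((PySem.List.pyGet? gene 5).getD 0 == 1)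
  out ++ [(dimAt dims perm.1, dimAt dims perm.2.1, dimAt dims perm.2.2)]

def rotate_items_3d_alt (genome : List (List Int)) (items : List (Int × Int × Int)) : List (Int × Int × Int) :=
  (items.zip genome).foldl rotStepB []

-- ===== PRECONDITION & SPEC =====
-- Pre_ excludes exactly the inputs where Python A raises IndexError: a gene paired with an item shorter than 6.
def Pre_rotate_items_3d (genome : List (List Int)) (items : List (Int × Int × Int)) : Prop :=
  ∀ p ∈ items.zip genome, 6 ≤ p.2.length
instance (genome : List (List Int)) (items : List (Int × Int × Int)) : Decidable (Pre_rotate_items_3d genome items) := by unfold Pre_rotate_items_3d; infer_instance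

def pvWitness_rotate_items_3d : List (List Int) × (List (Int × Int × Int)) :=
  ([[0, 0, 0, 1, 0, 1]], [(2, 3, 5)])

def Spec_rotate_items_3d (genome : List (List Int)) (items : List (Int × Int × Int)) (out : List (Int × Int × Int)) : Prop := out = rotate_items_3d_alt genome items
instance (genome : List (List Int)) (items : List (Int × Int × Int)) (out : List (Int × Int × Int)) : Decidable (Spec_rotate_items_3d genome items out) := by unfold Spec_rotate_items_3d; infer_instance

-- ===== CLAIM (what is proved, stated in full; the proofs are below) =====
def Claim_equal_rotate_items_3d : Prop := ∀ (genome : List (List Int)) (items : List (Int × Int × Int)), Dom_rotate_items_3d genome items → Pre_rotate_items_3d genome items → Spec_rotate_items_3d genome items (rotate_items_3d genome items)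

-- ===== LEMMAS AND PROOFS =====

-- pointwise: on a gene of length ≥ 6, the three swaps equal the table reindex
theorem step_eq (acc : List (Int × Int × Int)) (p : (Int × Int × Int) × List Int)
    (h : 6 ≤ p.2.length) : rotStepA acc p = rotStepB acc p := by
  obtain ⟨item, gene⟩ := p
  match gene, h with
  | a :: b :: c :: g3 :: g4 :: g5 :: rest, _ =>
    have e3 := PySem.List.pyGet?_ofNat (xs := a :: b :: c :: g3 :: g4 :: g5 :: rest) (n := 3) (by simp)
    have e4 := PySem.List.pyGet?_ofNat (xs := a :: b :: c :: g3 :: g4 :: g5 :: rest) (n := 4) (by simp)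
    have e5 := PySem.List.pyGet?_ofNat (xs := a :: b :: c :: g3 :: g4 :: g5 :: rest) (n := 5) (by simp)
    norm_num at e3 e4 e5
    unfold rotStepA rotStepB
    simp only [e3, e4, e5, Option.getD_some]
    cases hb3 : g3 == 1 <;> cases hb4 : g4 == 1 <;> cases hb5 : g5 == 1 <;>
      simp_all [beq_iff_eq, beq_eq_false_iff_ne, rotTable, dimAt]

theorem foldl_eq (l : List ((Int × Int × Int) × List Int))
    (hl : ∀ p ∈ l, 6 ≤ p.2.length) (acc : List (Int × Int × Int)) :
    l.foldl rotStepA acc = l.foldl rotStepB acc := by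
  induction l generalizing acc with
  | nil => rfl
  | cons p rest ih =>
    simp only [List.foldl_cons]
    rw [step_eq acc p (hl p (List.mem_cons_self ..))]
    exact ih (fun q hq => hl q (List.mem_cons_of_mem _ hq)) _

-- ===== VERDICT (by name: the statement is the Claim_ definition above) =====
theorem rotate_items_3d_spec : Claim_equal_rotate_items_3d := by
  intro genome items _ hpre
  unfold Spec_rotate_items_3d rotate_items_3d rotate_items_3d_alt
  exact foldl_eq _ hpre []
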